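-- pv_equiv track=rewrite | github.com/anon-hiktyq/FSE2026-ASGSE | src/LoopInvGen/inv_gen.py | append_inner_annotations
-- ===== SOURCE A (Python) =====
-- def append_inner_annotations(annotations):
--     updated_code = []
--     invariant_annotation = f"PLACE_HOLDER_LOOP"
--     found_first_annotation = False
--
--     for line in annotations.splitlines():
--         if not found_first_annotation and '/*@' in line:
--         # Append the current line
--             updated_code.append(line)
--         # Insert the invariant annotations below the first occurrence of /*@
--             updated_code.append(f"          {invariant_annotation}")
--             found_first_annotation = True
--         else:
--         # Keep other lines as they are
--             updated_code.append(line)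
--
--    # Join the list back into a single string and return
--     return "\n".join(updated_code)
-- ===== SOURCE B (Python) =====
-- def append_inner_annotations(annotations):
--     lines = annotations.splitlines()
--     i = next((k for k, line in enumerate(lines) if '/*@' in line), None)
--     if i is None:
--         return "\n".join(lines)
--     return "\n".join(lines[:i + 1] + ["          PLACE_HOLDER_LOOP"] + lines[i + 1:])
-- ===== Notes on version B (the rewrite author's own statement) =====
-- stated objective: simpler
-- what changed: Replaces A's accumulator loop with a found-flag by a search for the first matching line index followed by a list splice.
import Mathlib
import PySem

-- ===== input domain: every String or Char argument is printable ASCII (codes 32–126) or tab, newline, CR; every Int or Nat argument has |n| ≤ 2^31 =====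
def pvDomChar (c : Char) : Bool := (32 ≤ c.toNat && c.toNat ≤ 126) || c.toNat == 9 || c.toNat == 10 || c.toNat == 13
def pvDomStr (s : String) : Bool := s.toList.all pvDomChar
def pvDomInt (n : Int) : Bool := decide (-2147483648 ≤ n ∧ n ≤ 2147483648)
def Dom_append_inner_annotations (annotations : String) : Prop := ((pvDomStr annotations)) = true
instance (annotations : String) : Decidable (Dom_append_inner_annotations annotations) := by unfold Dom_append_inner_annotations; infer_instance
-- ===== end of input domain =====

-- B replaces A's accumulator loop with a found-flag by a first-match index search plus a
-- list splice (simpler decomposition); same return value on every input.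

-- ===== PORT A =====
-- A: one pass over splitlines with an accumulator and a found_first_annotation flag.
def append_inner_annotations (annotations : String) : String :=
  let st := (PySem.Str.splitlines annotations).foldl
    (fun (s : List String × Bool) line =>
      if !s.2 && PySem.Str.isIn "/*@" line then
        (s.1 ++ [line, "          PLACE_HOLDER_LOOP"], true)
      else
        (s.1 ++ [line], s.2))
    ([], false)
  PySem.Str.join "\n" st.1

-- ===== PORT B =====
-- B: find the index of the first line containing '/*@', then splice the placeholder in.
def append_inner_annotations_alt (annotations : String) : String :=
  let lines := PySem.Str.splitlines annotations
  match lines.findIdx? (fun l => PySem.Str.isIn "/*@" l) with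
  | none => PySem.Str.join "\n" lines
  | some i =>
      PySem.Str.join "\n"
        (lines.take (i + 1) ++ ["          PLACE_HOLDER_LOOP"] ++ lines.drop (i + 1))

-- ===== PRECONDITION & SPEC =====
def Spec_append_inner_annotations (annotations : String) (out : String) : Prop := out = append_inner_annotations_alt annotations
instance (annotations : String) (out : String) : Decidable (Spec_append_inner_annotations annotations out) := by unfold Spec_append_inner_annotations; infer_instance

-- ===== CLAIM (what is proved, stated in full; the proofs are below) =====
def Claim_equal_append_inner_annotations : Prop := ∀ (annotations : String), Dom_append_inner_annotations annotations → Spec_append_inner_annotations annotations (append_inner_annotations annotations)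

-- ===== LEMMAS AND PROOFS =====

-- Once the flag is true, A's loop just appends the remaining lines.
theorem aLoop_true (p : String → Bool) (ph : String) (lines : List String) (acc : List String) :
    (lines.foldl
      (fun (s : List String × Bool) line =>
        if !s.2 && p line then (s.1 ++ [line, ph], true) else (s.1 ++ [line], s.2))
      (acc, true)) = (acc ++ lines, true) := by
  induction lines generalizing acc with
  | nil => simp
  | cons l ls ih =>
    simp only [List.foldl_cons, Bool.not_true, Bool.false_and]
    rw [if_neg (by simp), ih]
    simp

-- With the flag false, A's loop computes exactly B's search-and-splice on the remaining lines.
theorem aLoop_false (p : String → Bool) (ph : String) (lines : List String) (acc : List String) :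
    ((lines.foldl
      (fun (s : List String × Bool) line =>
        if !s.2 && p line then (s.1 ++ [line, ph], true) else (s.1 ++ [line], s.2))
      (acc, false)).1) =
    acc ++ (match lines.findIdx? p with
      | none => lines
      | some i => lines.take (i + 1) ++ [ph] ++ lines.drop (i + 1)) := by
  induction lines generalizing acc with
  | nil => simp
  | cons l ls ih =>
    simp only [List.foldl_cons, List.findIdx?_cons, Bool.not_false, Bool.true_and]
    by_cases h : p l = true
    · rw [if_pos h, if_pos h, aLoop_true]
      simp
    · rw [if_neg (by simp [h]), if_neg (by simp [h]), ih]
      cases hf : ls.findIdx? p <;> simp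

-- ===== VERDICT (by name: the statement is the Claim_ definition above) =====
theorem append_inner_annotations_spec : Claim_equal_append_inner_annotations := by
  intro annotations _
  unfold Spec_append_inner_annotations append_inner_annotations append_inner_annotations_alt
  dsimp only
  rw [aLoop_false (fun l => PySem.Str.isIn "/*@" l) "          PLACE_HOLDER_LOOP"]
  cases hf : (PySem.Str.splitlines annotations).findIdx? (fun l => PySem.Str.isIn "/*@" l) <;>
    simp [hf]
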